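-- pv_equiv track=rewrite | github.com/VerstraeteBert/algos-ds | test/vraag4/src/yahtzee/39.py | grootste_score
-- ===== SOURCE A (Python) =====
-- def histogram(stenen):
--     dic = {}
--     for x in stenen:
--         if x in dic:
--             dic[x] += 1
--         else:
--             dic[x] = 1
--     return dic
--
-- def is_FullHouse(stenen):
--     aantal = histogram(stenen)
--     full = True
--     for x in aantal:
--         if not aantal[x] in (2, 3):
--             full = False
--     return full
--
-- def grootste_score(stenen):
--     stenen.sort()
--     aantal = histogram(stenen)
--     score = 0
--     for x in aantal:
--         if aantal[x] == 5:
--             score = max(score, 50)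
--     score = max(score, sum(stenen))
--     if is_FullHouse(stenen):
--         score = max(score, 25)
--     if is_grote_straat(stenen):
--         score = max(score, 40)
--     elif is_kleine_straat(stenen):
--         score = max(score, 30)
--     return score
--
-- def is_grote_straat(stenen):
--     stenen.sort()
--     gstraat = True
--     lengte = len(stenen) - 1
--     for x in range(lengte):
--         if stenen[x] + 1 != stenen[x+1]:
--             gstraat = False
--     return gstraat
--
-- def is_kleine_straat(stenen):
--     stenen.sort()
--     lengte = len(stenen)
--     for x in range(lengte):
--         kstraat = True
--         steen = stenen.copy()
--         steen.pop(x)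
--         lang = len(steen) - 1
--         for y in range(lang):
--             if steen[y] + 1 != steen[y+1]:
--                 kstraat = False
--         if kstraat:
--             return True
--     return False
-- ===== SOURCE B (Python) =====
-- def grootste_score(stenen):
--     # Note: like the original, this sorts `stenen` in place (observable mutation).
--     stenen.sort()
--     counts = {v: stenen.count(v) for v in set(stenen)}
--
--     def run(cnt):
--         # the multiset with these counts, laid out in order, is a consecutive run
--         if not cnt:
--             return True
--         if any(c != 1 for c in cnt.values()):
--             return False
--         return max(cnt) - min(cnt) == len(cnt) - 1
--
--     def small():
--         # removing one copy of some value leaves a consecutive run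
--         for v in counts:
--             c2 = dict(counts)
--             c2[v] -= 1
--             if c2[v] == 0:
--                 del c2[v]
--             if run(c2):
--                 return True
--         return False
--
--     best = max(0, sum(stenen))
--     if 5 in counts.values():
--         best = max(best, 50)              # five of a kind
--     if all(c in (2, 3) for c in counts.values()):
--         best = max(best, 25)              # full house (vacuously on no dice)
--     if run(counts):
--         best = max(best, 40)              # large straight
--     elif small():
--         best = max(best, 30)              # small straight
--     return best
-- ===== Notes on version B (the rewrite author's own statement) =====
-- stated objective: alternative
-- what changed: B replaces A's adjacency scans entirely: it builds one value->multiplicity dict and decides both straights arithmetically on it - a consecutive run is 'all multiplicities 1 and max-min = size-1' (and the small straight decrements one count and re-tests) - instead of A's sort-index scans comparing stenen[x]+1 to stenen[x+1] and its pop-every-index rescan.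
import Mathlib
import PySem

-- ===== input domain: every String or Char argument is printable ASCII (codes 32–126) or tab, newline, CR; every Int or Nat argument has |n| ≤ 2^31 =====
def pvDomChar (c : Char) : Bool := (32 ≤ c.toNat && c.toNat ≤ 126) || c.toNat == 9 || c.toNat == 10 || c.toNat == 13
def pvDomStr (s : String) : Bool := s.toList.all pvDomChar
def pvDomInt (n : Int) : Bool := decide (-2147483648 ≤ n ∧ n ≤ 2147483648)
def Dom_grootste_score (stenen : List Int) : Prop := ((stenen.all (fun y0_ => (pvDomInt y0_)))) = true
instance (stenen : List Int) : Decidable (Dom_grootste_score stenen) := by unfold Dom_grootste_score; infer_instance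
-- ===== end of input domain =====

-- B replaces A's adjacency scans over the sorted list by counts/min/max arithmetic on a value→multiplicity
-- dict: a straight is 'all multiplicities 1 and max−min = size−1' (objective: alternative algorithm).
-- Both A and B sort the argument in place in Python; the equivalence proved here is about the return value.

-- ===== PORT A =====
def histogram (stenen : List Int) : PySem.Dict Int Int :=
  stenen.foldl (fun dic x =>
    if dic.contains x then dic.insert x (dic.getD x 0 + 1)   -- dic[x] += 1
    else dic.insert x 1) PySem.Dict.empty

def is_FullHouse (stenen : List Int) : Bool :=
  let aantal := histogram stenen
  aantal.keys.foldl (fun full x =>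
    if !(aantal.getD x 0 == 2 || aantal.getD x 0 == 3) then false else full) true

def is_grote_straat (stenen : List Int) : Bool :=
  let st := PySem.List.sorted stenen (fun x => x) false
  let lengte : Int := PySem.List.len st - 1
  (PySem.List.pyRange 0 lengte 1).foldl (fun g x =>
    if PySem.List.pyGetD st x 0 + 1 != PySem.List.pyGetD st (x + 1) 0 then false else g) true

def kleineLoop (st : List Int) : List Int → Bool
  | [] => false
  | x :: rest =>
    -- steen = stenen.copy(); steen.pop(x)   (x is always a valid index here)
    let steen := match PySem.List.pop? st x with
      | some r => r.2
      | none => st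
    let lang : Int := PySem.List.len steen - 1
    let kstraat := (PySem.List.pyRange 0 lang 1).foldl (fun k y =>
      if PySem.List.pyGetD steen y 0 + 1 != PySem.List.pyGetD steen (y + 1) 0 then false else k) true
    if kstraat then true else kleineLoop st rest

def is_kleine_straat (stenen : List Int) : Bool :=
  let st := PySem.List.sorted stenen (fun x => x) false
  kleineLoop st (PySem.List.pyRange 0 (PySem.List.len st) 1)

def grootste_score (stenen : List Int) : Int :=
  let st := PySem.List.sorted stenen (fun x => x) false   -- stenen.sort() (in place)
  let aantal := histogram st
  let score : Int := aantal.keys.foldl (fun score x =>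
    if aantal.getD x 0 == 5 then max score 50 else score) 0
  let score := max score st.sum
  let score := if is_FullHouse st then max score 25 else score
  let score := if is_grote_straat st then max score 40
               else if is_kleine_straat st then max score 30 else score
  score

-- ===== PORT B =====
-- run(cnt): the multiset with these counts, laid out in order, is a consecutive run
def bRun (cnt : PySem.Dict Int Int) : Bool :=
  if cnt.size == 0 then true                                 -- if not cnt: return True
  else if cnt.values.any (fun c => c != 1) then false        -- if any(c != 1 for c in cnt.values())
  else ((PySem.List.max? cnt.keys (fun x => x)).getD 0
        - (PySem.List.min? cnt.keys (fun x => x)).getD 0) == (cnt.size : Int) - 1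
        -- max(cnt) - min(cnt) == len(cnt) - 1  (cnt nonempty here, so getD never defaults)

-- small(): for v in counts: c2 = dict(counts); c2[v] -= 1; if c2[v]==0: del c2[v]; if run(c2): return True
def bSmall (counts : PySem.Dict Int Int) : List Int → Bool
  | [] => false
  | v :: rest =>
    let c2 := counts.modify v 0 (· - 1)
    let c2 := if c2.getD v 0 == 0 then c2.erase v else c2
    if bRun c2 then true else bSmall counts rest

def grootste_score_alt (stenen : List Int) : Int :=
  let st := PySem.List.sorted stenen (fun x => x) false      -- stenen.sort() (in place)
  let counts := (PySem.Set.ofList st).foldl                  -- {v: stenen.count(v) for v in set(stenen)}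
    (fun d v => d.insert v ((PySem.List.count st v : Int))) PySem.Dict.empty
  let best := max 0 st.sum
  let best := if counts.values.contains 5 then max best 50 else best               -- five of a kind
  let best := if counts.values.all (fun c => c == 2 || c == 3) then max best 25 else best  -- full house
  if bRun counts then max best 40                                                  -- large straight
  else if bSmall counts counts.keys then max best 30 else best                     -- small straight

-- ===== PRECONDITION & SPEC =====
def Spec_grootste_score (stenen : List Int) (out : Int) : Prop := out = grootste_score_alt stenen
instance (stenen : List Int) (out : Int) : Decidable (Spec_grootste_score stenen out) := by unfold Spec_grootste_score; infer_instance

-- ===== CLAIM (what is proved, stated in full; the proofs are below) =====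
def Claim_equal_grootste_score : Prop := ∀ (stenen : List Int), Dom_grootste_score stenen → Spec_grootste_score stenen (grootste_score stenen)

-- ===== LEMMAS AND PROOFS =====

-- "the adjacent elements go up by exactly one"
def ChainP (xs : List Int) : Prop := xs.IsChain (fun a b => a + 1 = b)

-- A's adjacent-difference scan, as a Bool (proof-side helper only)
def consecB (xs : List Int) : Bool :=
  (PySem.List.pyRange 0 (PySem.List.len xs - 1) 1).all (fun i =>
    PySem.List.pyGetD xs i 0 + 1 == PySem.List.pyGetD xs (i + 1) 0)

lemma consec_iff (xs : List Int) : consecB xs = true ↔ ChainP xs := by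
  unfold consecB ChainP
  rw [List.isChain_iff_getElem, PySem.List.len_eq]
  simp only [List.all_eq_true, PySem.List.mem_pyRange_one]
  constructor
  · intro h i hi
    have h2 := h (i : Int) ⟨Int.natCast_nonneg i, by omega⟩
    rw [show ((i : Int) + 1) = ((i + 1 : Nat) : Int) by push_cast; ring] at h2
    rw [PySem.List.pyGetD_natCast, PySem.List.pyGetD_natCast,
        List.getD_eq_getElem _ _ (by omega), List.getD_eq_getElem _ _ hi] at h2
    exact beq_iff_eq.mp h2
  · intro h x hx
    obtain ⟨hx0, hxlt⟩ := hx
    lift x to Nat using hx0 with i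
    have hi : i + 1 < xs.length := by omega
    rw [show ((i : Int) + 1) = ((i + 1 : Nat) : Int) by push_cast; ring]
    rw [PySem.List.pyGetD_natCast, PySem.List.pyGetD_natCast,
        List.getD_eq_getElem _ _ (by omega), List.getD_eq_getElem _ _ hi]
    exact beq_iff_eq.mpr (h i hi)

lemma chain_nodup {xs : List Int} (h : ChainP xs) : xs.Nodup := by
  have hlt : xs.Pairwise (· < ·) :=
    List.isChain_iff_pairwise.mp (h.imp (fun a b hab => by omega))
  exact hlt.imp (fun hab => ne_of_lt hab)

lemma grote_eq (xs : List Int) :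
    is_grote_straat xs = consecB (PySem.List.sorted xs (fun x => x) false) := by
  unfold is_grote_straat consecB
  rw [PySem.List.foldl_if_false_eq, List.all_eq_not_any_not]
  simp [bne]

lemma kleineLoop_any (st : List Int) (L : List Int) :
    kleineLoop st L = L.any (fun x => consecB (match PySem.List.pop? st x with
      | some r => r.2
      | none => st)) := by
  induction L with
  | nil => rfl
  | cons x rest ih =>
    rw [kleineLoop]
    simp only [List.any_cons, ← ih]
    have hC : ∀ steen : List Int,
        ((PySem.List.pyRange 0 (PySem.List.len steen - 1) 1).foldl (fun k y =>
          if PySem.List.pyGetD steen y 0 + 1 != PySem.List.pyGetD steen (y + 1) 0 then false else k) true)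
        = consecB steen := by
      intro steen
      rw [PySem.List.foldl_if_false_eq, consecB, List.all_eq_not_any_not]
      simp [bne]
    rw [hC]
    cases h : consecB (match PySem.List.pop? st x with | some r => r.2 | none => st) <;> simp

lemma foldl_max50 (p : Int → Bool) (L : List Int) (a : Int) :
    L.foldl (fun sc k => if p k then max sc 50 else sc) a
      = if L.any p then max a 50 else a := by
  induction L generalizing a with
  | nil => simp
  | cons x L ih =>
    simp only [List.foldl_cons, List.any_cons]
    by_cases h : p x = true
    · simp only [h, if_true, Bool.true_or, ih]
      split <;> omega
    · simp only [h, Bool.false_or, ih]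
      simp

lemma histogram_eq (xs : List Int) : histogram xs = PySem.Dict.counter xs := by
  unfold histogram
  rw [← PySem.Dict.foldl_insert_getD_add_one_eq_counter]
  apply PySem.List.foldl_congr_mem
  intro d x _
  by_cases h : d.contains x = true
  · simp [h]
  · have h' : d.contains x = false := by simpa using h
    have h0 : d.getD x 0 = 0 := by
      rw [PySem.Dict.contains_eq_isSome_get?] at h'
      simp only [Option.isSome_eq_false_iff, Option.isNone_iff_eq_none] at h'
      simp [PySem.Dict.getD, h']
    simp [h', h0]

lemma foldl_add_sublist (l : List Int) : ∀ s : List Int, (l.foldl PySem.Set.add s).Sublist (s ++ l) := by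
  induction l with
  | nil => intro s; simp
  | cons x l ih =>
    intro s
    simp only [List.foldl_cons]
    refine (ih (PySem.Set.add s x)).trans ?_
    unfold PySem.Set.add
    split
    · exact List.Sublist.append_left (List.sublist_cons_self x l) s
    · simp

lemma ofList_sublist (l : List Int) : (PySem.Set.ofList l).Sublist l := by
  rw [PySem.Set.ofList_eq_foldl]
  simpa using foldl_add_sublist l []

lemma erase_getElem_eq_eraseIdx (st : List Int) (hsor : st.Pairwise (· ≤ ·))
    (k : Nat) (hk : k < st.length) : st.erase st[k] = st.eraseIdx k := by
  have hmem : st[k] ∈ st := List.getElem_mem hk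
  have p1 : (st[k] :: st.eraseIdx k).Perm st := List.getElem_cons_eraseIdx_perm hk
  have p2 : st.Perm (st[k] :: st.erase st[k]) := List.perm_cons_erase hmem
  have p3 : (st.erase st[k]).Perm (st.eraseIdx k) :=
    List.Perm.cons_inv ((p1.trans p2).symm)
  exact PySem.List.eq_of_perm_of_pairwise_le p3
    (List.Pairwise.sublist List.erase_sublist hsor)
    (List.Pairwise.sublist (List.eraseIdx_sublist st k) hsor)

-- A's small-straight loop over indices = "removing one copy of some value leaves a chain"
lemma kleineA_iff (st : List Int) (hsor : st.Pairwise (· ≤ ·)) :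
    kleineLoop st (PySem.List.pyRange 0 (PySem.List.len st) 1) = true
      ↔ ∃ v ∈ st, ChainP (st.erase v) := by
  rw [kleineLoop_any]
  simp only [List.any_eq_true]
  constructor
  · rintro ⟨x, hx, hchain⟩
    rw [PySem.List.mem_pyRange_one, PySem.List.len_eq] at hx
    obtain ⟨hx0, hxlt⟩ := hx
    lift x to Nat using hx0 with k
    have hk : k < st.length := by exact_mod_cast hxlt
    rw [PySem.List.pop?_natCast st k hk] at hchain
    refine ⟨st[k], List.getElem_mem hk, ?_⟩
    rw [erase_getElem_eq_eraseIdx st hsor k hk]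
    exact (consec_iff _).mp hchain
  · rintro ⟨v, hvst, hchain⟩
    have hk : st.idxOf v < st.length := List.idxOf_lt_length_of_mem hvst
    refine ⟨(st.idxOf v : Int), ?_, ?_⟩
    · rw [PySem.List.mem_pyRange_one, PySem.List.len_eq]
      exact ⟨Int.natCast_nonneg _, by exact_mod_cast hk⟩
    · rw [PySem.List.pop?_natCast st _ hk]
      rw [List.erase_eq_eraseIdx_of_idxOf rfl] at hchain
      exact (consec_iff _).mpr hchain

-- span arithmetic for strictly increasing integer lists
lemma last_ge (x : Int) (t : List Int) (h : (x :: t).Pairwise (· < ·)) :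
    x + t.length ≤ (x :: t).getLast (by simp) := by
  induction t generalizing x with
  | nil => simp
  | cons y t' ih =>
    have hxy : x < y := (List.pairwise_cons.mp h).1 y (by simp)
    have h' := (List.pairwise_cons.mp h).2
    have := ih y h'
    rw [List.getLast_cons (by simp)]
    simp only [List.length_cons]
    omega

lemma chain_iff_last (x : Int) (t : List Int) (h : (x :: t).Pairwise (· < ·)) :
    ChainP (x :: t) ↔ (x :: t).getLast (by simp) = x + t.length := by
  induction t generalizing x with
  | nil => simp [ChainP]
  | cons y t' ih =>
    have hxy : x < y := (List.pairwise_cons.mp h).1 y (by simp)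
    have h' := (List.pairwise_cons.mp h).2
    have hlast : (x :: y :: t').getLast (by simp) = (y :: t').getLast (by simp) :=
      List.getLast_cons (by simp)
    rw [ChainP, List.isChain_cons_cons, ← ChainP, ih y h', hlast]
    simp only [List.length_cons]
    constructor
    · rintro ⟨rfl, hl⟩
      rw [hl]; push_cast; ring
    · intro hl
      have hge := last_ge y t' h'
      have heq : y = x + 1 := by push_cast at hl; omega
      exact ⟨heq.symm, by push_cast at hl ⊢; omega⟩

lemma foldl_min_sorted (x : Int) (t : List Int) (h : (x :: t).Pairwise (· ≤ ·)) :
    t.foldl min x = x := by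
  induction t generalizing x with
  | nil => rfl
  | cons y t' ih =>
    have hxy : x ≤ y := (List.pairwise_cons.mp h).1 y (by simp)
    have h' := (List.pairwise_cons.mp h).2
    have hall := (List.pairwise_cons.mp h).1
    simp only [List.foldl_cons]
    rw [min_eq_left hxy]
    -- x :: t' is still sorted with x ≤ everything in t'
    have : (x :: t').Pairwise (· ≤ ·) := by
      rw [List.pairwise_cons]
      exact ⟨fun a ha => hall a (by simp [ha]), (List.pairwise_cons.mp h').2⟩
    exact ih x this
  
lemma foldl_max_sorted (x : Int) (t : List Int) (h : (x :: t).Pairwise (· ≤ ·)) :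
    t.foldl max x = (x :: t).getLast (by simp) := by
  induction t generalizing x with
  | nil => rfl
  | cons y t' ih =>
    have hxy : x ≤ y := (List.pairwise_cons.mp h).1 y (by simp)
    have h' := (List.pairwise_cons.mp h).2
    simp only [List.foldl_cons]
    have hlast : (x :: y :: t').getLast (by simp) = (y :: t').getLast (by simp) :=
      List.getLast_cons (by simp)
    rw [max_eq_right hxy, hlast]
    exact ih y h'

-- the dict-based run test is the chain property of the underlying multiset
lemma bRun_iff (ys : List Int) (hys : ys.Pairwise (· ≤ ·)) (d : PySem.Dict Int Int)
    (hitems : d.items = d.keys.map (fun k => (k, (List.count k ys : Int))))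
    (hkeys : d.keys.Pairwise (· < ·))
    (hmem : ∀ k, k ∈ d.keys ↔ k ∈ ys) :
    (bRun d = true) ↔ ChainP ys := by
  have hvals : d.values = d.keys.map (fun k => (List.count k ys : Int)) := by
    rw [PySem.Dict.values, hitems]; simp [List.map_map, Function.comp]
  have hsize : d.size = d.keys.length := by
    rw [PySem.Dict.size, PySem.Dict.keys, List.length_map]
  unfold bRun
  rcases hkshape : d.keys with _ | ⟨k0, krest⟩
  · -- no keys: no dice, both sides hold
    have hys0 : ys = [] := by
      refine List.eq_nil_iff_forall_not_mem.mpr (fun a ha => ?_)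
      have := (hmem a).mpr ha
      simp [hkshape] at this
    simp [hsize, hkshape, hys0, ChainP]
  · have hsz : (d.size == 0) = false := by
      simp [hsize, hkshape]
    rw [hsz, if_neg (by simp)]
    by_cases hnd : ys.Nodup
    · have hcnt : ∀ k ∈ d.keys, List.count k ys = 1 :=
        fun k hkm => (List.nodup_iff_count_eq_one.mp hnd) k ((hmem k).mp hkm)
      have hany : (d.values.any (fun c => c != 1)) = false := by
        rw [hvals]
        simp only [List.any_map, List.any_eq_false, Function.comp]
        intro k hkm
        simp [hcnt k hkm]
      rw [hany, if_neg (by simp)]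
      have hknodup : d.keys.Nodup := hkeys.imp ne_of_lt
      have hperm : d.keys.Perm ys := (List.perm_ext_iff_of_nodup hknodup hnd).mpr hmem
      have hkeq : d.keys = ys :=
        PySem.List.eq_of_perm_of_pairwise_le hperm (hkeys.imp le_of_lt) hys
      have hyslt : ys.Pairwise (· < ·) := hkeq ▸ hkeys
      have hysshape : ys = k0 :: krest := hkeq ▸ hkshape
      subst hysshape
      rw [PySem.List.max?_id_cons, PySem.List.min?_id_cons]
      rw [Option.getD_some, Option.getD_some]
      rw [foldl_min_sorted k0 krest hys, foldl_max_sorted k0 krest hys]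
      rw [chain_iff_last k0 krest hyslt]
      have hsz2 : d.size = krest.length + 1 := by rw [hsize, hkshape]; simp
      rw [hsz2, beq_iff_eq]
      push_cast
      constructor <;> intro h' <;> omega
    · have hnotchain : ¬ ChainP ys := fun hc => hnd (chain_nodup hc)
      obtain ⟨a, ha, hca⟩ : ∃ a ∈ ys, List.count a ys ≠ 1 := by
        by_contra hno
        push_neg at hno
        exact hnd (List.nodup_iff_count_eq_one.mpr hno)
      have hany : (d.values.any (fun c => c != 1)) = true := by
        rw [hvals]
        simp only [List.any_map, List.any_eq_true, Function.comp]
        refine ⟨a, (hmem a).mpr ha, ?_⟩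
        simpa using fun h => hca (by exact_mod_cast h)
      rw [hany]
      simp [hnotchain]

lemma counts_eq (st : List Int) :
    (PySem.Set.ofList st).foldl
      (fun d v => d.insert v ((PySem.List.count st v : Int))) PySem.Dict.empty
    = PySem.Dict.counter st := by
  apply PySem.Dict.ext
  rw [PySem.Dict.items_foldl_insert_fresh (PySem.Set.ofList st) (fun a => a)
        (fun a => (PySem.List.count st a : Int)) PySem.Dict.empty
        (fun a _ => PySem.Dict.contains_empty a)
        (by simpa using PySem.Set.nodup_ofList st)]
  rw [PySem.Dict.items_counter]
  simp [PySem.List.count_eq, PySem.Dict.empty]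

lemma keys_pairwise_lt (st : List Int) (hsor : st.Pairwise (· ≤ ·)) :
    (PySem.Set.ofList st).Pairwise (· < ·) := by
  have hle : (PySem.Set.ofList st).Pairwise (· ≤ ·) :=
    List.Pairwise.sublist (ofList_sublist st) hsor
  have hnd : (PySem.Set.ofList st).Nodup := PySem.Set.nodup_ofList st
  exact (hle.and hnd).imp (fun h => lt_of_le_of_ne h.1 h.2)

lemma bRun_counter (st : List Int) (hsor : st.Pairwise (· ≤ ·)) :
    (bRun (PySem.Dict.counter st) = true) ↔ ChainP st := by
  apply bRun_iff st hsor
  · rw [PySem.Dict.items_counter, PySem.Dict.keys_counter]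
  · rw [PySem.Dict.keys_counter]; exact keys_pairwise_lt st hsor
  · intro k; rw [PySem.Dict.keys_counter]; exact PySem.Set.mem_ofList st k

-- c2 = counts with one copy of v removed behaves as the counts dict of st.erase v
lemma bRun_c2 (st : List Int) (hsor : st.Pairwise (· ≤ ·)) (v : Int) (hv : v ∈ st) :
    (bRun (let c2 := (PySem.Dict.counter st).modify v 0 (· - 1)
           ; if c2.getD v 0 == 0 then c2.erase v else c2) = true) ↔ ChainP (st.erase v) := by
  have hcv : 0 < List.count v st := List.count_pos_iff.mpr hv
  have hcont : (PySem.Dict.counter st).contains v = true := by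
    rw [PySem.Dict.contains_counter]
    simpa using hv
  have hesor : (st.erase v).Pairwise (· ≤ ·) := List.Pairwise.sublist List.erase_sublist hsor
  simp only [PySem.Dict.modify, PySem.Dict.getD_counter, PySem.List.count_eq,
    PySem.Dict.getD_insert_self]
  have hitems1 : ((PySem.Dict.counter st).insert v ((List.count v st : Int) - 1)).items
      = (PySem.Set.ofList st).map
          (fun k => (k, if k = v then (List.count v st : Int) - 1 else (List.count k st : Int))) := by
    rw [PySem.Dict.items_insert_of_contains _ _ hcont, PySem.Dict.items_counter, List.map_map]
    apply List.map_congr_left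
    intro k _
    by_cases hkv : k = v
    · subst hkv; simp
    · simp [Function.comp, hkv]
  by_cases hc1 : List.count v st = 1
  · rw [if_pos (by rw [hc1]; simp)]
    have hitems2 : (((PySem.Dict.counter st).insert v ((List.count v st : Int) - 1)).erase v).items
        = ((PySem.Set.ofList st).filter (fun k => !(k == v))).map
            (fun k => (k, (List.count k (st.erase v) : Int))) := by
      show (((PySem.Dict.counter st).insert v ((List.count v st : Int) - 1)).items.filter
          (fun p => !(p.1 == v))) = _
      rw [hitems1, List.filter_map]
      have hpe : ((fun p : Int × Int => !(p.1 == v)) ∘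
          (fun k => (k, if k = v then (List.count v st : Int) - 1 else (List.count k st : Int))))
          = (fun k => !(k == v)) := rfl
      rw [hpe]
      apply List.map_congr_left
      intro k hk
      have hkv : k ≠ v := by
        have := (List.mem_filter.mp hk).2
        simpa using this
      simp [hkv, List.count_erase_of_ne hkv]
    have hkeys2 : (((PySem.Dict.counter st).insert v ((List.count v st : Int) - 1)).erase v).keys
        = (PySem.Set.ofList st).filter (fun k => !(k == v)) := by
      rw [PySem.Dict.keys, hitems2, List.map_map]
      rw [show ((fun p : Int × Int => p.1) ∘ (fun k => (k, (List.count k (st.erase v) : Int))))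
            = (fun k : Int => k) from rfl, List.map_id_fun']
      rfl
    apply bRun_iff (st.erase v) hesor
    · rw [hitems2, hkeys2]
    · rw [hkeys2]
      exact List.Pairwise.sublist List.filter_sublist (keys_pairwise_lt st hsor)
    · intro k
      rw [hkeys2, List.mem_filter]
      simp only [PySem.Set.mem_ofList, Bool.not_eq_eq_eq_not, Bool.not_true, beq_eq_false_iff_ne]
      constructor
      · rintro ⟨hkst, hkv⟩
        exact (List.mem_erase_of_ne hkv).mpr hkst
      · intro hke
        by_cases hkv : k = v
        · exfalso
          subst hkv
          have := List.count_pos_iff.mpr hke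
          rw [List.count_erase_self, hc1] at this
          omega
        · exact ⟨List.erase_sublist.subset hke, hkv⟩
  · rw [if_neg (by simp; omega)]
    apply bRun_iff (st.erase v) hesor
    · have hkeys1 : ((PySem.Dict.counter st).insert v ((List.count v st : Int) - 1)).keys
          = PySem.Set.ofList st := by
        rw [PySem.Dict.keys, hitems1, List.map_map]
        rw [show ((fun p : Int × Int => p.1) ∘ (fun k =>
              (k, if k = v then (List.count v st : Int) - 1 else (List.count k st : Int))))
            = (fun k : Int => k) from rfl, List.map_id_fun']
        rfl
      rw [hitems1, hkeys1]
      apply List.map_congr_left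
      intro k _
      by_cases hkv : k = v
      · rw [if_pos hkv, hkv, List.count_erase_self]
        simp only [Prod.mk.injEq]
        exact ⟨trivial, by omega⟩
      · simp [hkv, List.count_erase_of_ne hkv]
    · rw [PySem.Dict.keys, hitems1, List.map_map]
      rw [show ((fun p : Int × Int => p.1) ∘ (fun k =>
            (k, if k = v then (List.count v st : Int) - 1 else (List.count k st : Int))))
          = (fun k : Int => k) from rfl, List.map_id_fun']
      exact keys_pairwise_lt st hsor
    · intro k
      rw [PySem.Dict.keys, hitems1, List.map_map]
      have hid : ((fun p : Int × Int => p.1) ∘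
          (fun k => (k, if k = v then (List.count v st : Int) - 1 else (List.count k st : Int))))
          = (fun k : Int => k) := rfl
      rw [hid, List.map_id_fun']
      show k ∈ PySem.Set.ofList st ↔ k ∈ st.erase v
      rw [PySem.Set.mem_ofList]
      by_cases hkv : k = v
      · subst hkv
        constructor
        · intro _
          apply List.count_pos_iff.mp
          rw [List.count_erase_self]
          omega
        · intro _
          exact hv
      · exact (List.mem_erase_of_ne hkv).symm

lemma bSmall_any (d : PySem.Dict Int Int) (L : List Int) :
    bSmall d L = L.any (fun v =>
      bRun (let c2 := d.modify v 0 (· - 1); if c2.getD v 0 == 0 then c2.erase v else c2)) := by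
  induction L with
  | nil => rfl
  | cons v rest ih =>
    rw [bSmall]
    simp only [List.any_cons, ← ih]
    cases h : bRun (let c2 := d.modify v 0 (· - 1); if c2.getD v 0 == 0 then c2.erase v else c2) <;>
      simp [h]

lemma bSmall_iff (st : List Int) (hsor : st.Pairwise (· ≤ ·)) :
    (bSmall (PySem.Dict.counter st) (PySem.Set.ofList st) = true)
      ↔ ∃ v ∈ st, ChainP (st.erase v) := by
  rw [bSmall_any]
  simp only [List.any_eq_true]
  constructor
  · rintro ⟨v, hv, hrun⟩
    have hvst : v ∈ st := (PySem.Set.mem_ofList st v).mp hv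
    exact ⟨v, hvst, (bRun_c2 st hsor v hvst).mp hrun⟩
  · rintro ⟨v, hvst, hchain⟩
    exact ⟨v, (PySem.Set.mem_ofList st v).mpr hvst, (bRun_c2 st hsor v hvst).mpr hchain⟩

lemma counter_values (st : List Int) :
    (PySem.Dict.counter st).values
      = (PySem.Set.ofList st).map (fun k => (List.count k st : Int)) := by
  rw [PySem.Dict.values, PySem.Dict.items_counter]
  simp [List.map_map, Function.comp]

lemma foldl_if_not_false (p : Int → Bool) (L : List Int) :
    L.foldl (fun ok x => if !(p x) then false else ok) true = L.all p := by
  rw [PySem.List.foldl_if_false_eq, List.all_eq_not_any_not]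
  simp

lemma main_eq (stenen : List Int) : grootste_score stenen = grootste_score_alt stenen := by
  have hsor : (PySem.List.sorted stenen (fun x => x) false).Pairwise (· ≤ ·) :=
    PySem.List.sorted_pairwise stenen (fun x => x)
  have hstst := PySem.List.sorted_sorted stenen (fun x => x)
  set st := PySem.List.sorted stenen (fun x => x) false with hst
  have h5 : ((PySem.Set.ofList st).map (fun k => (List.count k st : Int))).contains 5
      = (PySem.Set.ofList st).any (fun k => ((List.count k st : Int) == 5)) := by
    apply Bool.coe_iff_coe.mp
    simp only [List.contains_iff_mem, List.mem_map, List.any_eq_true, beq_iff_eq]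
  have hfh : ((PySem.Set.ofList st).map (fun k => (List.count k st : Int))).all
        (fun c => c == 2 || c == 3)
      = (PySem.Set.ofList st).all
        (fun k => ((List.count k st : Int) == 2 || (List.count k st : Int) == 3)) := by
    rw [List.all_map]
    rfl
  have hg : bRun (PySem.Dict.counter st) = consecB st :=
    Bool.coe_iff_coe.mp ((bRun_counter st hsor).trans (consec_iff st).symm)
  have hk : bSmall (PySem.Dict.counter st) (PySem.Set.ofList st)
      = kleineLoop st (PySem.List.pyRange 0 (PySem.List.len st) 1) :=
    Bool.coe_iff_coe.mp ((bSmall_iff st hsor).trans (kleineA_iff st hsor).symm)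
  simp only [grootste_score, grootste_score_alt, is_FullHouse, is_kleine_straat,
    counts_eq, histogram_eq]
  simp only [PySem.Dict.keys_counter, PySem.Dict.getD_counter, counter_values,
    foldl_max50, foldl_if_not_false, grote_eq, hstst, ← hst,
    PySem.List.count_eq, h5, hfh, hg, hk]
  split_ifs <;> omega

-- ===== VERDICT (by name: the statement is the Claim_ definition above) =====
theorem grootste_score_spec : Claim_equal_grootste_score := by
  intro stenen _
  unfold Spec_grootste_score
  exact main_eq stenen
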